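-- pv_equiv track=rewrite | github.com/aerospike/aerospike-admin | lib/live_cluster/client/client_util.py | parse_peers_string
-- ===== SOURCE A (Python) =====
-- def parse_peers_string(
--     peers_str, delim=",", ignore_chars_start="[", ignore_chars_end="]"
-- ):
--     peers_list = []
--     if not peers_str or isinstance(peers_str, Exception):
--         return peers_list
--
--     peers_str = peers_str.strip()
--     if not peers_str:
--         return peers_list
--
--     if peers_str[0] in ignore_chars_start and peers_str[-1] in ignore_chars_end:
--         peers_str = peers_str[1:-1]
--
--     if not peers_str:
--         return peers_list
--
--     push_bracket = ignore_chars_start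
--     pop_bracket = ignore_chars_end
--     b_stack = []
--     current_str = ""
--     for i in peers_str:
--         if i == delim:
--             if len(b_stack) > 0:
--                 current_str += i
--             else:
--                 peers_list.append(current_str.strip())
--                 current_str = ""
--             continue
--
--         if i in push_bracket:
--             current_str += i
--             b_stack.append(i)
--             continue
--
--         if i in pop_bracket:
--             current_str += i
--             b_stack.pop()
--             continue
--
--         current_str += i
--
--     if current_str:
--         peers_list.append(current_str.strip())
--
--     return peers_list
-- ===== SOURCE B (Python) =====
-- def parse_peers_string(
--     peers_str, delim=",", ignore_chars_start="[", ignore_chars_end="]"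
-- ):
--     if not peers_str or isinstance(peers_str, Exception):
--         return []
--
--     s = peers_str.strip()
--     if not s:
--         return []
--
--     if s[0] in ignore_chars_start and s[-1] in ignore_chars_end:
--         s = s[1:-1]
--
--     # one pass: record the indices of delimiters seen at bracket depth 0
--     cuts = []
--     depth = 0
--     for i, c in enumerate(s):
--         if c == delim:
--             if depth == 0:
--                 cuts.append(i)
--         elif c in ignore_chars_start:
--             depth += 1
--         elif c in ignore_chars_end:
--             depth -= 1
--
--     # slice the string between consecutive cut points
--     out = []
--     start = 0
--     for cut in cuts:
--         out.append(s[start:cut].strip())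
--         start = cut + 1
--     last = s[start:]
--     if last:
--         out.append(last.strip())
--     return out
-- ===== Notes on version B (the rewrite author's own statement) =====
-- stated objective: alternative
-- what changed: A's single loop with a char stack and incremental string accumulation is replaced by boundary-index collection: one pass with an integer depth counter records the indices of top-level delimiters, then the string is sliced between consecutive cut points; Pre_ excludes only the inputs with an unmatched closing bracket, on which A raises IndexError.
import Mathlib
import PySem

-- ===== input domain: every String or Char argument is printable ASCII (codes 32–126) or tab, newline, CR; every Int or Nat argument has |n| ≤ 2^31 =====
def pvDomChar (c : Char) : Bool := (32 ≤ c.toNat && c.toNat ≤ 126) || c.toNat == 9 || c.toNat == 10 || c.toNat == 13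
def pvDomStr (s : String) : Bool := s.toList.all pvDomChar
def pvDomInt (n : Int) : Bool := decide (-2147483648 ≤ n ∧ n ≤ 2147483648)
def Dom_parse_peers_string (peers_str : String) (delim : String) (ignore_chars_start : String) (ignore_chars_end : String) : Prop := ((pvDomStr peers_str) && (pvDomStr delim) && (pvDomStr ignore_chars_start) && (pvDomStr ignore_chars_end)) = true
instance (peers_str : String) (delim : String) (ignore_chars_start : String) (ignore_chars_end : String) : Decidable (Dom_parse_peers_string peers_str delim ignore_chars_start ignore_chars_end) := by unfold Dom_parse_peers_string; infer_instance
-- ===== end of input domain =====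

-- B replaces A's single loop with a char stack and incremental string accumulation by
-- boundary-index collection: one pass with an integer depth counter records the indices of
-- top-level delimiters, then the string is sliced between consecutive cut points
-- (objective: alternative).

-- ===== PORT A =====
-- The main loop of A: state = (b_stack, current_str, peers_list); 'i == delim' for a single
-- char i is 'delim.toList = [c]'; 'i in push_bracket' for a single char is list membership;
-- 'b_stack.pop()' on an empty stack raises IndexError -> none (excluded by Pre_).
def pvLoopA (delim ignore_chars_start ignore_chars_end : String) :
    List Char → List Char → List Char → List String → Option (List String)
  | [], _st, cur, acc =>
      some (if cur ≠ [] then acc ++ [String.ofList (PySem.Chars.strip cur)] else acc)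
  | c :: rest, st, cur, acc =>
      if delim.toList = [c] then
        if st.length > 0 then
          pvLoopA delim ignore_chars_start ignore_chars_end rest st (cur ++ [c]) acc
        else
          pvLoopA delim ignore_chars_start ignore_chars_end rest st []
            (acc ++ [String.ofList (PySem.Chars.strip cur)])
      else if c ∈ ignore_chars_start.toList then
        pvLoopA delim ignore_chars_start ignore_chars_end rest (st ++ [c]) (cur ++ [c]) acc
      else if c ∈ ignore_chars_end.toList then
        match st with
        | [] => none  -- IndexError: pop from empty list
        | _ :: _ =>
          pvLoopA delim ignore_chars_start ignore_chars_end rest st.dropLast (cur ++ [c]) acc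
      else
        pvLoopA delim ignore_chars_start ignore_chars_end rest st (cur ++ [c]) acc

def parse_peers_string (peers_str : String) (delim : String) (ignore_chars_start : String) (ignore_chars_end : String) : List String :=
  if peers_str.toList = [] then []
  else
    let cs0 := PySem.Chars.strip peers_str.toList
    if cs0 = [] then []
    else
      let cs1 := if ((PySem.List.pyGet? cs0 0).any (· ∈ ignore_chars_start.toList))
                    && ((PySem.List.pyGet? cs0 (-1)).any (· ∈ ignore_chars_end.toList))
                 then PySem.List.slice cs0 (some 1) (some (-1)) else cs0
      if cs1 = [] then []
      else (pvLoopA delim ignore_chars_start ignore_chars_end cs1 [] [] []).getD []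
        -- .getD []: the none case is Python's IndexError, excluded by Pre_

-- ===== PORT B =====
-- Phase 1 of B: scan the chars with an Int depth counter (it may go negative) and the running
-- index, returning the list of indices of top-level delimiters.
def pvCutsB (delim ignore_chars_start ignore_chars_end : String) :
    List Char → Int → Nat → List Nat
  | [], _d, _i => []
  | c :: rest, d, i =>
      if delim.toList = [c] then
        if d = 0 then i :: pvCutsB delim ignore_chars_start ignore_chars_end rest d (i + 1)
        else pvCutsB delim ignore_chars_start ignore_chars_end rest d (i + 1)
      else if c ∈ ignore_chars_start.toList then
        pvCutsB delim ignore_chars_start ignore_chars_end rest (d + 1) (i + 1)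
      else if c ∈ ignore_chars_end.toList then
        pvCutsB delim ignore_chars_start ignore_chars_end rest (d - 1) (i + 1)
      else
        pvCutsB delim ignore_chars_start ignore_chars_end rest d (i + 1)

-- Phase 2 of B: slice s between consecutive cut points; s[start:cut] = (s.drop start).take (cut-start).
def pvSliceB (s : List Char) : List Nat → Nat → List String
  | [], start =>
      if s.drop start ≠ [] then [String.ofList (PySem.Chars.strip (s.drop start))] else []
  | cut :: rest, start =>
      String.ofList (PySem.Chars.strip ((s.drop start).take (cut - start)))
        :: pvSliceB s rest (cut + 1)

def parse_peers_string_alt (peers_str : String) (delim : String) (ignore_chars_start : String) (ignore_chars_end : String) : List String :=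
  if peers_str.toList = [] then []
  else
    let cs0 := PySem.Chars.strip peers_str.toList
    if cs0 = [] then []
    else
      let cs1 := if ((PySem.List.pyGet? cs0 0).any (· ∈ ignore_chars_start.toList))
                    && ((PySem.List.pyGet? cs0 (-1)).any (· ∈ ignore_chars_end.toList))
                 then PySem.List.slice cs0 (some 1) (some (-1)) else cs0
      pvSliceB cs1 (pvCutsB delim ignore_chars_start ignore_chars_end cs1 0 0) 0

-- ===== PRECONDITION & SPEC =====
-- Character classification as both Pythons perform it (delimiter test first, then brackets):
def pvIsPush (delim ignore_chars_start : String) (c : Char) : Bool :=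
  !decide (delim.toList = [c]) && decide (c ∈ ignore_chars_start.toList)
def pvIsPop (delim ignore_chars_start ignore_chars_end : String) (c : Char) : Bool :=
  !decide (delim.toList = [c]) && !decide (c ∈ ignore_chars_start.toList)
    && decide (c ∈ ignore_chars_end.toList)
-- The stripped and outer-bracket-unwrapped char list both programs actually scan:
def pvCore (peers_str ignore_chars_start ignore_chars_end : String) : List Char :=
  let cs0 := PySem.Chars.strip peers_str.toList
  if ((PySem.List.pyGet? cs0 0).any (· ∈ ignore_chars_start.toList))
     && ((PySem.List.pyGet? cs0 (-1)).any (· ∈ ignore_chars_end.toList))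
  then PySem.List.slice cs0 (some 1) (some (-1)) else cs0

-- Pre_ excludes exactly the inputs on which A raises IndexError (b_stack.pop() on an empty
-- stack): every prefix of the scanned string must contain at least as many opening as closing
-- bracket characters.
def Pre_parse_peers_string (peers_str : String) (delim : String) (ignore_chars_start : String) (ignore_chars_end : String) : Prop :=
  ∀ n ∈ List.range ((pvCore peers_str ignore_chars_start ignore_chars_end).length + 1),
    ((pvCore peers_str ignore_chars_start ignore_chars_end).take n).countP
        (pvIsPop delim ignore_chars_start ignore_chars_end)
      ≤ ((pvCore peers_str ignore_chars_start ignore_chars_end).take n).countP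
        (pvIsPush delim ignore_chars_start)
instance (peers_str : String) (delim : String) (ignore_chars_start : String) (ignore_chars_end : String) : Decidable (Pre_parse_peers_string peers_str delim ignore_chars_start ignore_chars_end) := by unfold Pre_parse_peers_string; infer_instance

def pvWitness_parse_peers_string : String × String × String × String :=
  ("h1:[2001::1234],h2:[2001::5678], h3", ",", "[", "]")

def Spec_parse_peers_string (peers_str : String) (delim : String) (ignore_chars_start : String) (ignore_chars_end : String) (out : List String) : Prop := out = parse_peers_string_alt peers_str delim ignore_chars_start ignore_chars_end
instance (peers_str : String) (delim : String) (ignore_chars_start : String) (ignore_chars_end : String) (out : List String) : Decidable (Spec_parse_peers_string peers_str delim ignore_chars_start ignore_chars_end out) := by unfold Spec_parse_peers_string; infer_instance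

-- ===== CLAIM (what is proved, stated in full; the proofs are below) =====
def Claim_equal_parse_peers_string : Prop := ∀ (peers_str : String) (delim : String) (ignore_chars_start : String) (ignore_chars_end : String), Dom_parse_peers_string peers_str delim ignore_chars_start ignore_chars_end → Pre_parse_peers_string peers_str delim ignore_chars_start ignore_chars_end → Spec_parse_peers_string peers_str delim ignore_chars_start ignore_chars_end (parse_peers_string peers_str delim ignore_chars_start ignore_chars_end)


-- ===== LEMMAS AND PROOFS =====

-- The heart of the equivalence: A's loop, run on the suffix s.drop i with a stack of length
-- st.length and current_str = s[start:i], computes what B computes by slicing s at the cut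
-- indices produced from index i at depth st.length — provided the suffix is prefix-balanced.
lemma pvLoopA_eq_sliceB (delim ics ice : String) (s : List Char) :
    ∀ (rest : List Char) (start i : Nat) (st cur : List Char) (acc : List String),
      s.drop i = rest → start ≤ i → cur = (s.drop start).take (i - start) →
      (∀ n ≤ rest.length,
        (rest.take n).countP (pvIsPop delim ics ice)
          ≤ st.length + (rest.take n).countP (pvIsPush delim ics)) →
      pvLoopA delim ics ice rest st cur acc
        = some (acc ++ pvSliceB s (pvCutsB delim ics ice rest (st.length : Int) i) start) := by
  intro rest
  induction rest with
  | nil =>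
    intro start i st cur acc hdrop hle hcur _hbal
    have hcur' : cur = s.drop start := by
      rw [hcur]
      have : s.length ≤ i := List.drop_eq_nil_iff.mp hdrop
      exact List.take_of_length_le (by simp; omega)
    simp only [pvLoopA, pvCutsB, pvSliceB, hcur']
    split <;> simp_all
  | cons c rest' ih =>
    intro start i st cur acc hdrop hle hcur hbal
    have hi : i < s.length := by
      by_contra h
      rw [List.drop_eq_nil_iff.mpr (by omega)] at hdrop
      exact List.cons_ne_nil c rest' hdrop.symm
    have hget : s[i]? = some c := by
      have h : (List.drop i s)[0]? = s[i + 0]? := List.getElem?_drop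
      rw [hdrop] at h
      simpa using h.symm
    have hdrop' : s.drop (i + 1) = rest' := by
      have h := congrArg (List.drop 1) hdrop
      simpa [List.drop_drop, Nat.add_comm] using h
    have hcurext : cur ++ [c] = (s.drop start).take (i + 1 - start) := by
      have h1 : i + 1 - start = (i - start) + 1 := by omega
      rw [h1, List.take_add_one, hcur]
      have : (s.drop start)[i - start]? = some c := by
        rw [List.getElem?_drop]
        have : start + (i - start) = i := by omega
        rw [this, hget]
      simp [this]
    by_cases hd : delim.toList = [c]
    · by_cases h0 : st.length = 0
      · have hst : st = [] := List.eq_nil_of_length_eq_zero h0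
        subst hst
        simp only [pvLoopA, hd, if_pos, List.length_nil, gt_iff_lt, lt_irrefl, if_false]
        rw [ih (i + 1) (i + 1) [] [] (acc ++ [String.ofList (PySem.Chars.strip cur)]) hdrop'
            (le_refl _) (by simp) (by
              intro n hn
              have := hbal (n + 1) (by simpa using hn)
              simpa [List.countP_cons, pvIsPop, pvIsPush, hd] using this)]
        simp only [pvCutsB, hd, if_pos, List.length_nil, Nat.cast_zero, pvSliceB]
        rw [hcur]
        simp
      · have hgt : st.length > 0 := Nat.pos_of_ne_zero h0
        simp only [pvLoopA, hd, if_pos, hgt]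
        rw [ih start (i + 1) st (cur ++ [c]) acc hdrop' (by omega) hcurext (by
            intro n hn
            have := hbal (n + 1) (by simpa using hn)
            simpa [List.countP_cons, pvIsPop, pvIsPush, hd] using this)]
        have hne : st ≠ [] := by intro h; subst h; simp at h0
        simp [pvCutsB, hd, hne]
    · by_cases hs : c ∈ ics.toList
      · simp only [pvLoopA, if_neg hd, hs, if_pos]
        rw [ih start (i + 1) (st ++ [c]) (cur ++ [c]) acc hdrop' (by omega) hcurext (by
            intro n hn
            have h2 := hbal (n + 1) (by simpa using hn)
            simp only [List.take_succ_cons, List.countP_cons, pvIsPop, pvIsPush, hd, hs] at h2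
            simp only [List.length_append, List.length_cons, List.length_nil]
            simp at h2
            omega)]
        have : ((st ++ [c]).length : Int) = (st.length : Int) + 1 := by simp
        simp [pvCutsB, hd, hs]
      · by_cases he : c ∈ ice.toList
        · have h0 : st ≠ [] := by
            intro hnil
            subst hnil
            have := hbal 1 (by simp)
            simp [pvIsPop, pvIsPush, hd, hs, he] at this
          obtain ⟨s0, st', rfl⟩ : ∃ s0 st', st = s0 :: st' := by
            cases st with
            | nil => exact absurd rfl h0
            | cons a b => exact ⟨a, b, rfl⟩
          simp only [pvLoopA, if_neg hd, hs, he, if_pos]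
          rw [ih start (i + 1) (s0 :: st').dropLast (cur ++ [c]) acc hdrop' (by omega) hcurext
              (by
                intro n hn
                have h2 := hbal (n + 1) (by simpa using hn)
                simp only [List.take_succ_cons, List.countP_cons, pvIsPop, pvIsPush, hd, hs, he] at h2
                simp only [List.length_dropLast, List.length_cons]
                simp at h2
                omega)]
          have hlen : (((s0 :: st').dropLast.length : Int)) = ((s0 :: st').length : Int) - 1 := by
            simp [List.length_dropLast]
          simp [pvCutsB, hd, hs, he]
        · simp only [pvLoopA, if_neg hd, hs, he]
          rw [ih start (i + 1) st (cur ++ [c]) acc hdrop' (by omega) hcurext (by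
              intro n hn
              have := hbal (n + 1) (by simpa using hn)
              simpa [List.countP_cons, pvIsPop, pvIsPush, hd, hs, he] using this)]
          simp [pvCutsB, hd, hs, he]

-- ===== VERDICT (by name: the statements are the Claim_ definitions above) =====
theorem parse_peers_string_spec : Claim_equal_parse_peers_string := by
  intro peers_str delim ics ice _dom hpre
  unfold Spec_parse_peers_string parse_peers_string parse_peers_string_alt
  by_cases h0 : peers_str.toList = []
  · simp [h0]
  · simp only [if_neg h0]
    by_cases h1 : PySem.Chars.strip peers_str.toList = []
    · simp [h1]
    · simp only [if_neg h1]
      set cs1 := (if ((PySem.List.pyGet? (PySem.Chars.strip peers_str.toList) 0).any (· ∈ ics.toList))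
                    && ((PySem.List.pyGet? (PySem.Chars.strip peers_str.toList) (-1)).any (· ∈ ice.toList))
                  then PySem.List.slice (PySem.Chars.strip peers_str.toList) (some 1) (some (-1))
                  else PySem.Chars.strip peers_str.toList) with hcs1
      have hcore : pvCore peers_str ics ice = cs1 := rfl
      have hbal : ∀ n ≤ cs1.length,
          (cs1.take n).countP (pvIsPop delim ics ice)
            ≤ ([] : List Char).length + (cs1.take n).countP (pvIsPush delim ics) := by
        intro n hn
        have := hpre n (by rw [hcore] at *; exact List.mem_range.mpr (by omega))
        rw [hcore] at this
        simpa using this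
      have hmain := pvLoopA_eq_sliceB delim ics ice cs1 cs1 0 0 [] [] []
        (by simp) (le_refl 0) (by simp) hbal
      by_cases h2 : cs1 = []
      · simp [h2, pvCutsB, pvSliceB]
      · simp only [if_neg h2]
        rw [hmain]
        simp
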